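-- pv_equiv track=rewrite | github.com/varunu28/A-Kata-A-Day | Python/Sorting on planet Twisted-3-7.py | adj_arr
-- ===== SOURCE A (Python) =====
-- def adj_arr(arr):
-- 	new_arr = []
-- 	i = 0
-- 	while i < len(arr):
-- 		j = 0
-- 		str_i = list(str(arr[i]))
-- 		while j < len(str_i):
-- 			if str_i[j] == '7':
-- 				str_i[j] = '3'
-- 			elif str_i[j] == '3':
-- 				str_i[j] = '7'
-- 			j += 1
-- 		new_arr.append(int(''.join(str_i)))
-- 		i += 1
-- 	return new_arr
-- ===== SOURCE B (Python) =====
-- def adj_arr(arr):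
--     out = []
--     for n in arr:
--         sign = -1 if n < 0 else 1
--         m = -n if n < 0 else n
--         res = 0
--         place = 1
--         while m > 0:
--             d = m % 10
--             if d == 3:
--                 d = 7
--             elif d == 7:
--                 d = 3
--             res += d * place
--             place *= 10
--             m //= 10
--         out.append(sign * res)
--     return out
-- ===== Notes on version B (the rewrite author's own statement) =====
-- stated objective: faster
-- what changed: Swaps the digits 3 and 7 arithmetically (least-significant-first with % 10 and // 10, rebuilding the value with a place accumulator) instead of converting each number to a string, rewriting characters one index at a time, and parsing it back with int().
import Mathlib
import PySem

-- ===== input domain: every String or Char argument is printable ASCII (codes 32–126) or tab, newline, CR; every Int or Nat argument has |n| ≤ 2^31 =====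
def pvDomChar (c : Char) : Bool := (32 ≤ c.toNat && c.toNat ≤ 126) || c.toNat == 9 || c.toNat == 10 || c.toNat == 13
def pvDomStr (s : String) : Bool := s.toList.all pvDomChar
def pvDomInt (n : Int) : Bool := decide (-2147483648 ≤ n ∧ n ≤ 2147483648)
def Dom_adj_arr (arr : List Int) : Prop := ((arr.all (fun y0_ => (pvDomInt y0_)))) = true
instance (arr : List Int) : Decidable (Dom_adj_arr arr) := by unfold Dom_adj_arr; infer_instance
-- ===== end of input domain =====

-- B swaps the digits 3 and 7 arithmetically (% 10 // 10 with a place accumulator) instead of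
-- rewriting the characters of str(n) and re-parsing with int(); measurably faster (no str/int round-trip).

-- ===== PORT A =====
-- body of the inner `while j` loop: the character rewrite applied at one position
def swapcA (c : Char) : Char := if c = '7' then '3' else if c = '3' then '7' else c

-- the inner `while j < len(str_i)` loop: rewrite position j, j += 1 (front to back)
def swapCharsA : List Char → List Char
  | [] => []
  | c :: r => swapcA c :: swapCharsA r

-- the outer `while i < len(arr)` loop; str(arr[i]) = PySem.Int.toChars, int(''.join(str_i)) =
-- PySem.Int.ofChars?; int() never raises here (the rewritten string is still a signed digit
-- string), so the .getD 0 default is never taken (proved en route to the claim)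
def adj_arr : List Int → List Int
  | [] => []
  | x :: xs => (PySem.Int.ofChars? (swapCharsA (PySem.Int.toChars x))).getD 0 :: adj_arr xs

-- ===== PORT B =====
-- the `while m > 0` loop of Source B: res/place accumulators, digits least-significant-first
def swapLoopB (m res place : Nat) : Nat :=
  if h : m = 0 then res
  else
    swapLoopB (m / 10)
      (res + (if m % 10 = 3 then 7 else if m % 10 = 7 then 3 else m % 10) * place)
      (place * 10)
termination_by m
decreasing_by exact Nat.div_lt_self (Nat.pos_of_ne_zero h) (by omega)

def adj_arr_alt (arr : List Int) : List Int :=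
  arr.map fun n => (if n < 0 then (-1 : Int) else 1) * ((swapLoopB n.natAbs 0 1 : Nat) : Int)

-- ===== PRECONDITION & SPEC =====
def Spec_adj_arr (arr : List Int) (out : List Int) : Prop := out = adj_arr_alt arr
instance (arr : List Int) (out : List Int) : Decidable (Spec_adj_arr arr out) := by unfold Spec_adj_arr; infer_instance

-- ===== CLAIM (what is proved, stated in full; the proofs are below) =====
def Claim_equal_adj_arr : Prop := ∀ (arr : List Int), Dom_adj_arr arr → Spec_adj_arr arr (adj_arr arr)

-- ===== LEMMAS AND PROOFS =====

-- the digit swap 3↔7 on a single decimal digit value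
def swapd (k : Nat) : Nat := if k = 3 then 7 else if k = 7 then 3 else k

-- the intended value: |n| with its decimal digits 3 and 7 exchanged
def V (m : Nat) : Nat :=
  if h : m = 0 then 0 else V (m / 10) * 10 + swapd (m % 10)
termination_by m
decreasing_by exact Nat.div_lt_self (Nat.pos_of_ne_zero h) (by omega)

-- every element is a decimal digit character
def dAll (ds : List Char) : Prop := ∀ c ∈ ds, ∃ k, k < 10 ∧ c = Nat.digitChar k

-- ---- Nat.toDigits structure ----

lemma core_app : ∀ (f n : Nat) (ds : List Char),
    Nat.toDigitsCore 10 f n ds = Nat.toDigitsCore 10 f n [] ++ ds := by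
  intro f
  induction f with
  | zero => intro n ds; simp [Nat.toDigitsCore]
  | succ f ih =>
    intro n ds
    simp only [Nat.toDigitsCore]
    by_cases h : n / 10 = 0
    · simp [h]
    · simp only [h, ite_false]
      rw [ih (n / 10) ((n % 10).digitChar :: ds), ih (n / 10) [(n % 10).digitChar]]
      simp

lemma core_fuel : ∀ (n f1 f2 : Nat), n < f1 → n < f2 →
    Nat.toDigitsCore 10 f1 n [] = Nat.toDigitsCore 10 f2 n [] := by
  intro n
  induction n using Nat.strong_induction_on with
  | _ n ih =>
    intro f1 f2 h1 h2
    obtain ⟨g1, rfl⟩ : ∃ g1, f1 = g1 + 1 := ⟨f1 - 1, by omega⟩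
    obtain ⟨g2, rfl⟩ : ∃ g2, f2 = g2 + 1 := ⟨f2 - 1, by omega⟩
    simp only [Nat.toDigitsCore]
    by_cases h : n / 10 = 0
    · simp [h]
    · simp only [h, ite_false]
      have hn : 0 < n := by
        rcases Nat.eq_zero_or_pos n with h0 | h0
        · exfalso; apply h; simp [h0]
        · exact h0
      have hlt : n / 10 < n := Nat.div_lt_self hn (by omega)
      rw [core_app g1, core_app g2, ih (n / 10) hlt g1 g2 (by omega) (by omega)]

lemma td_small {m : Nat} (h : m < 10) : Nat.toDigits 10 m = [Nat.digitChar m] := by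
  simp only [Nat.toDigits, Nat.toDigitsCore]
  have h1 : m / 10 = 0 := Nat.div_eq_of_lt h
  have h2 : m % 10 = m := Nat.mod_eq_of_lt h
  simp [h1, h2]

lemma td_step {m : Nat} (h : 10 ≤ m) :
    Nat.toDigits 10 m = Nat.toDigits 10 (m / 10) ++ [Nat.digitChar (m % 10)] := by
  simp only [Nat.toDigits]
  conv_lhs => rw [Nat.toDigitsCore]
  have h0 : ¬ m / 10 = 0 := by omega
  simp only [h0, ite_false]
  rw [core_app m, core_fuel (m / 10) m (m / 10 + 1) (Nat.div_lt_self (by omega) (by omega)) (by omega)]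

lemma td_ne_nil (m : Nat) : Nat.toDigits 10 m ≠ [] := by
  by_cases h : m < 10
  · simp [td_small h]
  · simp [td_step (by omega : 10 ≤ m)]

lemma td_form : ∀ m : Nat, dAll (Nat.toDigits 10 m) := by
  intro m
  induction m using Nat.strong_induction_on with
  | _ m ih =>
    by_cases h : m < 10
    · intro c hc
      rw [td_small h] at hc
      simp at hc
      exact ⟨m, h, hc⟩
    · intro c hc
      rw [td_step (by omega : 10 ≤ m)] at hc
      rcases List.mem_append.1 hc with h1 | h1
      · exact ih (m / 10) (Nat.div_lt_self (by omega) (by omega)) c h1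
      · simp at h1
        exact ⟨m % 10, by omega, h1⟩

-- ---- per-digit character facts (k < 10, by exhausting the ten cases) ----

lemma dig_isDigit {k : Nat} (h : k < 10) : (Nat.digitChar k).isDigit = true := by
  interval_cases k <;> decide

lemma dig_val {k : Nat} (h : k < 10) : (Nat.digitChar k).toNat - '0'.toNat = k := by
  interval_cases k <;> decide

lemma dig_notSpace {k : Nat} (h : k < 10) : PySem.Int.isIntSpace (Nat.digitChar k) = false := by
  interval_cases k <;> decide

lemma swapcA_dig {k : Nat} (h : k < 10) : swapcA (Nat.digitChar k) = Nat.digitChar (swapd k) := by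
  interval_cases k <;> decide

lemma swapd_lt {k : Nat} (h : k < 10) : swapd k < 10 := by
  unfold swapd; split_ifs <;> omega

-- ---- capturing the (private) digit parser behind PySem.Int.ofChars? ----
-- dv is int()'s digit-string evaluator, H its accumulator loop restricted to "a digit was seen";
-- every equation holds by definitional unfolding, which pins the existentials to the real parser.
lemma parseEx : ∃ (dv : List Char → Option Nat) (H : List Char → Nat → Option Nat)
    (G2 : Char → List Char → Option Nat) (G3 : Char → List Char → Nat → Option Nat),
    (∀ s, PySem.Int.ofChars? s =
      PySem.Int.ofChars?.match_1 (motive := fun _ => Option Int)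
        (((s.dropWhile PySem.Int.isIntSpace).reverse.dropWhile PySem.Int.isIntSpace).reverse)
        (fun ds => Option.map (fun n => -n) (do let a ← dv ds; pure ((a : Int))))
        (fun ds => Option.map (fun n => n) (do let a ← dv ds; pure ((a : Int))))
        (fun ds => Option.map (fun n => n) (do let a ← dv ds; pure ((a : Int)))))
    ∧ (∀ c cs, dv (c :: cs) = if c.isDigit = true then H cs (0 * 10 + (c.toNat - '0'.toNat)) else G2 c cs)
    ∧ (∀ a, H [] a = some a)
    ∧ (∀ c cs a, H (c :: cs) a = if c.isDigit = true then H cs (a * 10 + (c.toNat - '0'.toNat)) else G3 c cs a) := by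
  refine ⟨_, _, _, _, fun s => rfl, fun c cs => rfl, fun a => rfl, fun c cs a => rfl⟩

-- match_1 evaluation on the two list shapes that occur
lemma m1_neg (ds : List Char) (f1 f2 f3 : List Char → Option Int) :
    PySem.Int.ofChars?.match_1 (motive := fun _ => Option Int) ('-' :: ds) f1 f2 f3 = f1 ds := rfl

lemma m1_dig {k : Nat} (h : k < 10) (rest : List Char) (f1 f2 f3 : List Char → Option Int) :
    PySem.Int.ofChars?.match_1 (motive := fun _ => Option Int) (Nat.digitChar k :: rest) f1 f2 f3
      = f3 (Nat.digitChar k :: rest) := by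
  interval_cases k <;> rfl

-- ---- int()'s whitespace trimming is the identity on sign/digit strings ----

lemma dw_noop {p : Char → Bool} : ∀ {xs : List Char}, (∀ c ∈ xs, p c = false) →
    xs.dropWhile p = xs := by
  intro xs h
  cases xs with
  | nil => rfl
  | cons c r => simp [h c (by simp)]

lemma clean_noop {xs : List Char} (h : ∀ c ∈ xs, PySem.Int.isIntSpace c = false) :
    ((xs.dropWhile PySem.Int.isIntSpace).reverse.dropWhile PySem.Int.isIntSpace).reverse = xs := by
  rw [dw_noop h, dw_noop (by intro c hc; exact h c (List.mem_reverse.1 hc)), List.reverse_reverse]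

-- ---- the captured loop H on digit strings is a left fold ----

lemma Hval {H : List Char → Nat → Option Nat} {G3 : Char → List Char → Nat → Option Nat}
    (h3 : ∀ a, H [] a = some a)
    (h4 : ∀ c cs a, H (c :: cs) a = if c.isDigit = true then H cs (a * 10 + (c.toNat - '0'.toNat)) else G3 c cs a) :
    ∀ ds a, dAll ds → H ds a = some (ds.foldl (fun acc c => acc * 10 + (c.toNat - '0'.toNat)) a) := by
  intro ds
  induction ds with
  | nil => intro a _; simp [h3]
  | cons c r ih =>
    intro a hd
    obtain ⟨k, hk, rfl⟩ := hd c (by simp)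
    rw [h4, if_pos (dig_isDigit hk), List.foldl_cons]
    exact ih _ (fun x hx => hd x (by simp [hx]))

lemma swapCharsA_map : ∀ ds : List Char, swapCharsA ds = ds.map swapcA := by
  intro ds
  induction ds with
  | nil => rfl
  | cons c r ih => simp [swapCharsA, ih]

lemma V_small {m : Nat} (h : m < 10) : V m = swapd m := by
  by_cases h0 : m = 0
  · subst h0; rw [V]; simp [swapd]
  · rw [V]; simp [h0, Nat.div_eq_of_lt h, Nat.mod_eq_of_lt h, V]

lemma V_step {m : Nat} (h : m ≠ 0) : V m = V (m / 10) * 10 + swapd (m % 10) := by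
  rw [V]; simp [h]

lemma dAll_swap {m : Nat} : dAll ((Nat.toDigits 10 m).map swapcA) := by
  intro c hc
  simp only [List.mem_map] at hc
  obtain ⟨d, hd, rfl⟩ := hc
  obtain ⟨k, hk, rfl⟩ := td_form m d hd
  exact ⟨swapd k, swapd_lt hk, by rw [swapcA_dig hk]⟩

lemma L_fold : ∀ m a : Nat,
    ((Nat.toDigits 10 m).map swapcA).foldl (fun acc c => acc * 10 + (c.toNat - '0'.toNat)) a
      = a * 10 ^ (Nat.toDigits 10 m).length + V m := by
  intro m
  induction m using Nat.strong_induction_on with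
  | _ m ih =>
    intro a
    by_cases h : m < 10
    · rw [td_small h]
      simp only [List.map_cons, List.map_nil, List.foldl_cons, List.foldl_nil, List.length_cons,
        List.length_nil]
      rw [swapcA_dig h, dig_val (swapd_lt h), V_small h]
      ring
    · rw [td_step (by omega : 10 ≤ m)]
      simp only [List.map_append, List.foldl_append, List.length_append, List.map_cons,
        List.map_nil, List.foldl_cons, List.foldl_nil, List.length_cons, List.length_nil]
      rw [ih (m / 10) (Nat.div_lt_self (by omega) (by omega)) a]
      rw [swapcA_dig (by omega : m % 10 < 10), dig_val (swapd_lt (by omega : m % 10 < 10))]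
      rw [V_step (by omega : m ≠ 0)]
      ring

lemma L_loop : ∀ m res place : Nat, swapLoopB m res place = res + place * V m := by
  intro m
  induction m using Nat.strong_induction_on with
  | _ m ih =>
    intro res place
    by_cases h : m = 0
    · subst h; rw [swapLoopB, V]; simp
    · rw [swapLoopB]
      simp only [h, dite_false]
      rw [ih (m / 10) (Nat.div_lt_self (Nat.pos_of_ne_zero h) (by omega)), V_step h]
      have : (if m % 10 = 3 then 7 else if m % 10 = 7 then 3 else m % 10) = swapd (m % 10) := rfl
      rw [this]; ring

-- the parsed value of the swapped digit string of m is V m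
lemma parse_swapped {dv : List Char → Option Nat} {H : List Char → Nat → Option Nat}
    {G2 : Char → List Char → Option Nat} {G3 : Char → List Char → Nat → Option Nat}
    (h2 : ∀ c cs, dv (c :: cs) = if c.isDigit = true then H cs (0 * 10 + (c.toNat - '0'.toNat)) else G2 c cs)
    (h3 : ∀ a, H [] a = some a)
    (h4 : ∀ c cs a, H (c :: cs) a = if c.isDigit = true then H cs (a * 10 + (c.toNat - '0'.toNat)) else G3 c cs a)
    (m : Nat) : dv ((Nat.toDigits 10 m).map swapcA) = some (V m) := by
  cases hds : (Nat.toDigits 10 m).map swapcA with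
  | nil =>
    exfalso
    exact td_ne_nil m (List.map_eq_nil_iff.1 hds)
  | cons c rest =>
    have hall : dAll (c :: rest) := hds ▸ dAll_swap
    obtain ⟨k, hk, rfl⟩ := hall c (by simp)
    rw [h2, if_pos (dig_isDigit hk), dig_val hk,
      Hval h3 h4 rest (0 * 10 + k) (fun x hx => hall x (by simp [hx]))]
    have := L_fold m 0
    rw [hds] at this
    simp only [List.foldl_cons, dig_val hk, Nat.zero_mul, Nat.zero_add] at this ⊢
    rw [this]

lemma elem_eq (n : Int) :
    (PySem.Int.ofChars? (swapCharsA (PySem.Int.toChars n))).getD 0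
      = (if n < 0 then (-1 : Int) else 1) * ((swapLoopB n.natAbs 0 1 : Nat) : Int) := by
  obtain ⟨dv, H, G2, G3, hA, h2, h3, h4⟩ := parseEx
  have hloop : swapLoopB n.natAbs 0 1 = V n.natAbs := by rw [L_loop]; simp
  rw [hloop]
  by_cases hn : n < 0
  · simp only [PySem.Int.toChars, hn, if_pos]
    rw [swapCharsA_map, List.map_cons, hA]
    have hmins : swapcA '-' = '-' := by decide
    rw [hmins]
    have hns : ∀ c ∈ '-' :: (Nat.toDigits 10 n.natAbs).map swapcA, PySem.Int.isIntSpace c = false := by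
      intro c hc
      rcases List.mem_cons.1 hc with rfl | hc
      · decide
      · obtain ⟨k, hk, rfl⟩ := dAll_swap c hc
        exact dig_notSpace hk
    rw [clean_noop hns, m1_neg, parse_swapped h2 h3 h4]
    simp
  · simp only [PySem.Int.toChars, hn, ite_false]
    have htn : n.toNat = n.natAbs := by omega
    rw [htn, swapCharsA_map, hA]
    have hns : ∀ c ∈ (Nat.toDigits 10 n.natAbs).map swapcA, PySem.Int.isIntSpace c = false := by
      intro c hc
      obtain ⟨k, hk, rfl⟩ := dAll_swap c hc
      exact dig_notSpace hk
    rw [clean_noop hns]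
    cases hds : (Nat.toDigits 10 n.natAbs).map swapcA with
    | nil => exact absurd (List.map_eq_nil_iff.1 hds) (td_ne_nil _)
    | cons c rest =>
      have hall : dAll (c :: rest) := hds ▸ dAll_swap
      obtain ⟨k, hk, rfl⟩ := hall c (by simp)
      rw [m1_dig hk]
      have := parse_swapped h2 h3 h4 (m := n.natAbs)
      rw [hds] at this
      rw [this]
      simp

lemma adj_eq : ∀ arr : List Int, adj_arr arr = adj_arr_alt arr := by
  intro arr
  induction arr with
  | nil => rfl
  | cons x xs ih =>
    simp only [adj_arr, adj_arr_alt, List.map_cons]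
    rw [elem_eq x, ih]
    rfl

-- ===== VERDICT (by name: the statement is the Claim_ definition above) =====
theorem adj_arr_spec : Claim_equal_adj_arr := by
  intro arr _
  unfold Spec_adj_arr
  exact adj_eq arr
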